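-- pv_equiv track=rewrite | github.com/maveryn/vlm-fix | vlm_fix/games/tictactoe.py | _allocate_line_targets
-- ===== SOURCE A (Python) =====
-- from typing import Dict, List, Sequence, Tuple
--
-- def _allocate_line_targets(total: int, line_names: List[str], capacities: Dict[str, int]) -> Dict[str, int]:
--     if total <= 0:
--         return {name: 0 for name in line_names}
--     n = len(line_names)
--     base = total // n
--     targets = {name: min(base, capacities.get(name, 0)) for name in line_names}
--     assigned = sum(targets.values())
--     while assigned < total:
--         progressed = False
--         for name in line_names:
--             if targets[name] < capacities.get(name, 0):
--                 targets[name] += 1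
--                 assigned += 1
--                 progressed = True
--                 if assigned >= total:
--                     break
--         if not progressed:
--             break
--     return targets
-- ===== SOURCE B (Python) =====
-- def _allocate_line_targets(total, line_names, capacities):
--     if total <= 0:
--         return {name: 0 for name in line_names}
--     n = len(line_names)
--     base = total // n
--     mult = {}
--     for name in line_names:
--         mult[name] = mult.get(name, 0) + 1
--     caps = {name: capacities.get(name, 0) for name in mult}
--     targets = {name: min(base, caps[name]) for name in mult}
--     assigned = sum(targets.values())
--     if total <= assigned:
--         return targets
--     if sum(caps.values()) < total:
--         # not enough capacity: every line ends up at its full capacity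
--         return caps
--
--     def filled(p):
--         # total assignment after p full round-robin rounds
--         return sum(min(caps[nm], base + p * mult[nm]) for nm in mult)
--
--     # binary search the first round count p with filled(p) >= total
--     lo = 0
--     hi = 1
--     for c in caps.values():
--         hi = max(hi, c - base)
--     while lo + 1 < hi:
--         mid = (lo + hi) // 2
--         if filled(mid) >= total:
--             hi = mid
--         else:
--             lo = mid
--     p = hi
--     # state after p - 1 full rounds, then hand out the rest in line order
--     targets = {nm: min(caps[nm], base + (p - 1) * mult[nm]) for nm in mult}
--     assigned = sum(targets.values())
--     for name in line_names:
--         if assigned >= total: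
--             break
--         if targets[name] < caps[name]:
--             targets[name] += 1
--             assigned += 1
--     return targets
-- ===== Notes on version B (the rewrite author's own statement) =====
-- stated objective: faster
-- what changed: Replaces the one-unit-per-line round-robin refill while-loop by multiplicity-aware water-filling: binary-search the first full round whose capped fill reaches total, rebuild that round's state directly from a closed form, and hand out the few remaining units in a single final pass.
import Mathlib
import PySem

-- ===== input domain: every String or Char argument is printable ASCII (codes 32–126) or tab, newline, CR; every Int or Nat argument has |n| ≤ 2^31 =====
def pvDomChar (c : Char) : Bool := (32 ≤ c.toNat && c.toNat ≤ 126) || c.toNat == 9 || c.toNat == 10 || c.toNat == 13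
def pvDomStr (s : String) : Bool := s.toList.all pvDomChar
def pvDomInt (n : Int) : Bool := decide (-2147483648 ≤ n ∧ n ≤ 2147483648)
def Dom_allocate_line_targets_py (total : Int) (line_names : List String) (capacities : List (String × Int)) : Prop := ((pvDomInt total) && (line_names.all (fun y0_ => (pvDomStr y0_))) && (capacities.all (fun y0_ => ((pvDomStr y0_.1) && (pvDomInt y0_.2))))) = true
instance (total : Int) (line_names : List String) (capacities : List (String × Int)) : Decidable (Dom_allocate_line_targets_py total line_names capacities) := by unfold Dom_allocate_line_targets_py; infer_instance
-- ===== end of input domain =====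

-- B replaces A's one-unit-per-line round-robin refill while-loop by capped water-filling
-- (binary search on the fill level, then one pass handing out the leftover units); faster on large totals.

-- ===== PORT A =====

-- the inner `for name in line_names: …` loop (with its `break` on assigned >= total)
def aFor (total : Int) (capd : PySem.Dict String Int) :
    List String → PySem.Dict String Int → Int → Bool → PySem.Dict String Int × Int × Bool
  | [], t, a, p => (t, a, p)
  | nm :: rest, t, a, p =>
    if t.getD nm 0 < capd.getD nm 0 then
      if total ≤ a + 1 then (t.modify nm 0 (· + 1), a + 1, true)
      else aFor total capd rest (t.modify nm 0 (· + 1)) (a + 1) true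
    else aFor total capd rest t a p

-- termination helpers for the `while assigned < total` loop (cited by aWhile's decreasing_by)
lemma aFor_le (total : Int) (capd : PySem.Dict String Int) :
    ∀ (names : List String) (t : PySem.Dict String Int) (a : Int) (p : Bool),
      a ≤ (aFor total capd names t a p).2.1 := by
  intro names
  induction names with
  | nil => intro t a p; simp [aFor]
  | cons nm rest ih =>
    intro t a p
    simp only [aFor]
    split
    · split
      · simp
      · exact le_trans (by omega) (ih _ _ _)
    · exact ih _ _ _

lemma aFor_progress (total : Int) (capd : PySem.Dict String Int) :
    ∀ (names : List String) (t : PySem.Dict String Int) (a : Int),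
      (aFor total capd names t a false).2.2 = true →
      a + 1 ≤ (aFor total capd names t a false).2.1 := by
  intro names
  induction names with
  | nil => intro t a h; simp [aFor] at h
  | cons nm rest ih =>
    intro t a h
    by_cases hc : t.getD nm 0 < capd.getD nm 0
    · by_cases hb : total ≤ a + 1
      · simp [aFor, hc, hb]
      · simp only [aFor, if_pos hc, if_neg hb]
        exact le_trans (by omega) (aFor_le total capd rest _ _ _)
    · simp only [aFor, if_neg hc] at h ⊢
      exact ih _ _ h

-- the `while assigned < total: …` loop
def aWhile (total : Int) (capd : PySem.Dict String Int) (names : List String)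
    (t : PySem.Dict String Int) (a : Int) : PySem.Dict String Int :=
  if h : a < total then
    if hp : (aFor total capd names t a false).2.2 = true then
      aWhile total capd names (aFor total capd names t a false).1
        (aFor total capd names t a false).2.1
    else (aFor total capd names t a false).1
  else t
termination_by (total - a).toNat
decreasing_by
  have := aFor_progress total capd names t a hp
  omega

def allocate_line_targets_py (total : Int) (line_names : List String) (capacities : List (String × Int)) : List (String × Int) :=
  if total ≤ 0 then
    (line_names.foldl (fun d nm => d.insert nm 0) PySem.Dict.empty).items
  else
    let n : Int := PySem.List.len line_names
    let base : Int := PySem.Int.floordiv total n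
    let capd := PySem.Dict.mk capacities
    let targets := line_names.foldl (fun d nm => d.insert nm (min base (capd.getD nm 0))) PySem.Dict.empty
    let assigned := targets.values.sum
    (aWhile total capd line_names targets assigned).items

-- ===== PORT B =====

-- Source B's `filled(p)`: total assignment after p full rounds (sum over the distinct keys)
def bFilledK (capsd multd : PySem.Dict String Int) (keys : List String) (base p : Int) : Int :=
  (keys.map (fun k => min (capsd.getD k 0) (base + p * multd.getD k 0))).sum

-- midpoint bounds, cited by bSearch's decreasing_by
lemma bMid (lo hi : Int) (h : lo + 1 < hi) :
    lo + 1 ≤ PySem.Int.floordiv (lo + hi) 2 ∧ PySem.Int.floordiv (lo + hi) 2 < hi := by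
  constructor
  · rw [PySem.Int.le_floordiv_iff_mul_le (by omega)]; omega
  · rw [PySem.Int.floordiv_lt_iff_lt_mul (by omega)]; omega

-- Source B's `while lo + 1 < hi: …` binary search on the round count
def bSearch (total : Int) (capsd multd : PySem.Dict String Int) (keys : List String)
    (base lo hi : Int) : Int :=
  if h : lo + 1 < hi then
    if total ≤ bFilledK capsd multd keys base (PySem.Int.floordiv (lo + hi) 2) then
      bSearch total capsd multd keys base lo (PySem.Int.floordiv (lo + hi) 2)
    else bSearch total capsd multd keys base (PySem.Int.floordiv (lo + hi) 2) hi
  else hi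
termination_by (hi - lo).toNat
decreasing_by
  · have h1 := (bMid lo hi h).1
    have h2 := (bMid lo hi h).2
    omega
  · have h1 := (bMid lo hi h).1
    have h2 := (bMid lo hi h).2
    omega

-- Source B's final `for name in line_names: …` hand-out pass (break once assigned reaches total)
def bGo (total : Int) (capsd : PySem.Dict String Int) :
    List String → PySem.Dict String Int → Int → PySem.Dict String Int
  | [], t, _ => t
  | nm :: rest, t, a =>
    if total ≤ a then t
    else if t.getD nm 0 < capsd.getD nm 0 then
      bGo total capsd rest (t.modify nm 0 (· + 1)) (a + 1)
    else bGo total capsd rest t a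

def allocate_line_targets_py_alt (total : Int) (line_names : List String) (capacities : List (String × Int)) : List (String × Int) :=
  if total ≤ 0 then
    (line_names.foldl (fun d nm => d.insert nm 0) PySem.Dict.empty).items
  else
    let n : Int := PySem.List.len line_names
    let base : Int := PySem.Int.floordiv total n
    let capd := PySem.Dict.mk capacities
    let multd := line_names.foldl (fun d nm => d.insert nm (d.getD nm 0 + 1))
      (PySem.Dict.empty : PySem.Dict String Int)
    let capsd := multd.keys.foldl (fun d nm => d.insert nm (capd.getD nm 0)) PySem.Dict.empty
    let targets0 := multd.keys.foldl (fun d nm => d.insert nm (min base (capsd.getD nm 0)))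
      PySem.Dict.empty
    let assigned := targets0.values.sum
    if total ≤ assigned then targets0.items
    else if capsd.values.sum < total then capsd.items
    else
      let hi := capsd.values.foldl (fun h c => max h (c - base)) 1
      let p := bSearch total capsd multd multd.keys base 0 hi
      let st := multd.keys.foldl
        (fun d nm => d.insert nm (min (capsd.getD nm 0) (base + (p - 1) * multd.getD nm 0)))
        PySem.Dict.empty
      let a0 := st.values.sum
      (bGo total capsd line_names st a0).items

-- ===== PRECONDITION & SPEC =====
-- Pre_ excludes only total > 0 with an empty line list, where the Python raises ZeroDivisionError
-- at `total // n`.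
def Pre_allocate_line_targets_py (total : Int) (line_names : List String) (capacities : List (String × Int)) : Prop :=
  0 < total → line_names ≠ []
instance (total : Int) (line_names : List String) (capacities : List (String × Int)) : Decidable (Pre_allocate_line_targets_py total line_names capacities) := by unfold Pre_allocate_line_targets_py; infer_instance

def pvWitness_allocate_line_targets_py : Int × List String × (List (String × Int)) := (5, ["a", "b"], [("a", 3), ("b", 4)])

def Spec_allocate_line_targets_py (total : Int) (line_names : List String) (capacities : List (String × Int)) (out : List (String × Int)) : Prop := out = allocate_line_targets_py_alt total line_names capacities
instance (total : Int) (line_names : List String) (capacities : List (String × Int)) (out : List (String × Int)) : Decidable (Spec_allocate_line_targets_py total line_names capacities out) := by unfold Spec_allocate_line_targets_py; infer_instance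

-- ===== CLAIM (what is proved, stated in full; the proofs are below) =====
def Claim_equal_allocate_line_targets_py : Prop := ∀ (total : Int) (line_names : List String) (capacities : List (String × Int)), Dom_allocate_line_targets_py total line_names capacities → Pre_allocate_line_targets_py total line_names capacities → Spec_allocate_line_targets_py total line_names capacities (allocate_line_targets_py total line_names capacities)

-- ===== LEMMAS AND PROOFS =====

-- proof-side models of one hand-out sweep over the occurrence list: the units it gives out (gainD)
-- and the dict it produces when no break interrupts it (bumpD)
def gainD (capd : PySem.Dict String Int) : List String → PySem.Dict String Int → Int
  | [], _ => 0
  | nm :: os, d =>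
    if d.getD nm 0 < capd.getD nm 0 then 1 + gainD capd os (d.modify nm 0 (· + 1))
    else gainD capd os d

def bumpD (capd : PySem.Dict String Int) : List String → PySem.Dict String Int → PySem.Dict String Int
  | [], d => d
  | nm :: os, d =>
    if d.getD nm 0 < capd.getD nm 0 then bumpD capd os (d.modify nm 0 (· + 1))
    else bumpD capd os d

lemma gainD_nonneg (capd : PySem.Dict String Int) :
    ∀ (os : List String) (d : PySem.Dict String Int), 0 ≤ gainD capd os d := by
  intro os
  induction os with
  | nil => intro d; simp [gainD]
  | cons nm os ih =>
    intro d
    simp only [gainD]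
    split
    · have := ih (d.modify nm 0 (· + 1))
      omega
    · exact ih d

lemma bGo_done (total : Int) (capsd : PySem.Dict String Int) (os : List String)
    (d : PySem.Dict String Int) (a : Int) (h : total ≤ a) :
    bGo total capsd os d a = d := by
  cases os with
  | nil => rfl
  | cons nm os => simp [bGo, h]

-- A's inner for-loop equals B's final hand-out pass (plus the assigned/progressed bookkeeping)
lemma aFor_eq (total : Int) (capd capsd : PySem.Dict String Int) :
    ∀ (os : List String) (d : PySem.Dict String Int) (a : Int) (p : Bool), a < total →
      (∀ nm ∈ os, capsd.getD nm 0 = capd.getD nm 0) →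
      aFor total capd os d a p =
        (bGo total capsd os d a, min total (a + gainD capd os d),
         p || decide (0 < gainD capd os d)) := by
  intro os
  induction os with
  | nil =>
    intro d a p ha _
    simp only [aFor, bGo, gainD]
    have h1 : min total (a + 0) = a := by omega
    rw [h1]
    simp
  | cons nm os ih =>
    intro d a p ha hcap
    have hcap' : ∀ x ∈ os, capsd.getD x 0 = capd.getD x 0 := fun x hx => hcap x (by simp [hx])
    have hceq : capsd.getD nm 0 = capd.getD nm 0 := hcap nm (by simp)
    simp only [aFor, bGo, hceq]
    rw [if_neg (by omega : ¬ total ≤ a)]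
    by_cases hc : d.getD nm 0 < capd.getD nm 0
    · have hgain : gainD capd (nm :: os) d = 1 + gainD capd os (d.modify nm 0 (· + 1)) := by
        simp [gainD, hc]
      rw [hgain, if_pos hc, if_pos hc]
      have hg := gainD_nonneg capd os (d.modify nm 0 (· + 1))
      by_cases hb : total ≤ a + 1
      · rw [if_pos hb]
        rw [bGo_done total capsd os _ (a + 1) hb]
        have h1 : min total (a + (1 + gainD capd os (d.modify nm 0 (· + 1)))) = a + 1 := by
          omega
        have h2 : (0 : Int) < 1 + gainD capd os (d.modify nm 0 (· + 1)) := by omega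
        simp [h1, h2]
      · rw [if_neg hb]
        rw [ih (d.modify nm 0 (· + 1)) (a + 1) true (by omega) hcap']
        have h1 : min total (a + 1 + gainD capd os (d.modify nm 0 (· + 1)))
            = min total (a + (1 + gainD capd os (d.modify nm 0 (· + 1)))) := by omega
        have h2 : (0 : Int) < 1 + gainD capd os (d.modify nm 0 (· + 1)) := by omega
        simp [h1, h2]
    · have hgain : gainD capd (nm :: os) d = gainD capd os d := by
        simp [gainD, hc]
      rw [hgain, if_neg hc, if_neg hc]
      exact ih d a p ha hcap'

lemma bGo_eq_bump (total : Int) (capd capsd : PySem.Dict String Int) :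
    ∀ (os : List String) (d : PySem.Dict String Int) (a : Int),
      a + gainD capd os d < total →
      (∀ nm ∈ os, capsd.getD nm 0 = capd.getD nm 0) →
      bGo total capsd os d a = bumpD capd os d := by
  intro os
  induction os with
  | nil =>
    intro d a _ _
    rfl
  | cons nm os ih =>
    intro d a hlt hcap
    have hcap' : ∀ x ∈ os, capsd.getD x 0 = capd.getD x 0 := fun x hx => hcap x (by simp [hx])
    have hceq : capsd.getD nm 0 = capd.getD nm 0 := hcap nm (by simp)
    simp only [gainD] at hlt
    simp only [bGo, bumpD, hceq]
    by_cases hc : d.getD nm 0 < capd.getD nm 0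
    · rw [if_pos hc] at hlt
      have hg := gainD_nonneg capd os (d.modify nm 0 (· + 1))
      rw [if_neg (by omega : ¬ total ≤ a), if_pos hc, if_pos hc]
      exact ih _ (a + 1) (by omega) hcap'
    · rw [if_neg hc] at hlt
      have hg := gainD_nonneg capd os d
      rw [if_neg (by omega : ¬ total ≤ a), if_neg hc, if_neg hc]
      exact ih d a (by omega) hcap'

-- getD of a fold of inserts whose value depends only on the key
lemma getD_foldl_insert_keyfn (v : String → Int) :
    ∀ (l : List String) (d : PySem.Dict String Int) (k : String),
      (l.foldl (fun d nm => d.insert nm (v nm)) d).getD k 0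
        = if k ∈ l then v k else d.getD k 0 := by
  intro l
  induction l with
  | nil => intro d k; simp
  | cons nm l ih =>
    intro d k
    simp only [List.foldl_cons, ih, PySem.Dict.getD_insert]
    by_cases hk : k ∈ l
    · simp [hk]
    · by_cases he : k = nm <;> simp [hk, he]

lemma bump_getD (capd : PySem.Dict String Int) :
    ∀ (os : List String) (d : PySem.Dict String Int) (k : String),
      (∀ nm ∈ os, d.getD nm 0 ≤ capd.getD nm 0) →
      d.getD k 0 ≤ capd.getD k 0 →
      (bumpD capd os d).getD k 0 = min (capd.getD k 0) (d.getD k 0 + (os.count k : Int)) := by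
  intro os
  induction os with
  | nil =>
    intro d k _ hk
    simp only [bumpD, List.count_nil]
    push_cast
    omega
  | cons nm os ih =>
    intro d k hos hk
    have hos' : ∀ x ∈ os, d.getD x 0 ≤ capd.getD x 0 := fun x hx => hos x (by simp [hx])
    simp only [bumpD, List.count_cons]
    by_cases hc : d.getD nm 0 < capd.getD nm 0
    · rw [if_pos hc]
      have hpres : ∀ x ∈ os, (d.modify nm 0 (· + 1)).getD x 0 ≤ capd.getD x 0 := by
        intro x hx
        rw [PySem.Dict.getD_modify]
        by_cases he : x = nm
        · subst he; simp only [if_pos rfl]; omega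
        · rw [if_neg he]; exact hos' x hx
      have hpresk : (d.modify nm 0 (· + 1)).getD k 0 ≤ capd.getD k 0 := by
        rw [PySem.Dict.getD_modify]
        by_cases he : k = nm
        · subst he; simp only [if_pos rfl]; omega
        · rw [if_neg he]; exact hk
      rw [ih _ k hpres hpresk, PySem.Dict.getD_modify]
      by_cases he : k = nm
      · subst he
        have hb : (k == k) = true := by simp
        simp only [if_pos rfl, hb, if_true]
        push_cast
        omega
      · rw [if_neg he]
        simp [Ne.symm he]
    · rw [if_neg hc]
      have heq : d.getD nm 0 = capd.getD nm 0 := le_antisymm (hos nm (by simp)) (by omega)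
      rw [ih d k hos' hk]
      by_cases he : k = nm
      · subst he
        have hb : (k == k) = true := by simp
        simp only [hb, if_true]
        have hcnt : (0 : Int) ≤ (os.count k : Int) := by positivity
        push_cast
        omega
      · simp [Ne.symm he]

lemma bump_keys (capd : PySem.Dict String Int) :
    ∀ (os : List String) (d : PySem.Dict String Int),
      (∀ nm ∈ os, d.contains nm = true) →
      (bumpD capd os d).keys = d.keys := by
  intro os
  induction os with
  | nil => intro d _; rfl
  | cons nm os ih =>
    intro d hos
    simp only [bumpD]
    by_cases hc : d.getD nm 0 < capd.getD nm 0
    · rw [if_pos hc]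
      have hcm : ∀ x ∈ os, (d.modify nm 0 (· + 1)).contains x = true := by
        intro x hx
        rw [PySem.Dict.contains_modify]
        simp [hos x (by simp [hx])]
      rw [ih _ hcm, PySem.Dict.keys_modify,
        PySem.Dict.keys_insert_of_contains _ _ (hos nm (by simp))]
    · rw [if_neg hc]
      exact ih d (fun x hx => hos x (by simp [hx]))

-- modifying one present key shifts the keyed sum by exactly the change at that key
lemma sum_map_getD_modify (keys0 : List String) (hnd : keys0.Nodup)
    (d : PySem.Dict String Int) (nm : String) (hmem : nm ∈ keys0) (f : Int → Int) :
    (keys0.map (fun k => (d.modify nm 0 f).getD k 0)).sum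
      = (keys0.map (fun k => d.getD k 0)).sum + (f (d.getD nm 0) - d.getD nm 0) := by
  induction keys0 with
  | nil => simp at hmem
  | cons y ks ih =>
    have hyn : y ∉ ks := (List.nodup_cons.mp hnd).1
    have hnd' : ks.Nodup := (List.nodup_cons.mp hnd).2
    simp only [List.map_cons, List.sum_cons]
    rcases List.mem_cons.mp hmem with he | hmem'
    · subst he
      have hmapeq : ks.map (fun k => (d.modify nm 0 f).getD k 0)
          = ks.map (fun k => d.getD k 0) :=
        List.map_congr_left (fun x hx => by
          rw [PySem.Dict.getD_modify, if_neg (by rintro rfl; exact hyn hx)])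
      rw [hmapeq, PySem.Dict.getD_modify, if_pos rfl]
      omega
    · have hyne : y ≠ nm := fun h => hyn (h ▸ hmem')
      rw [PySem.Dict.getD_modify, if_neg hyne, ih hnd' hmem']
      omega

lemma gain_eq_sum (capd : PySem.Dict String Int) (keys0 : List String) (hnd : keys0.Nodup) :
    ∀ (os : List String) (d : PySem.Dict String Int),
      (∀ nm ∈ os, d.getD nm 0 ≤ capd.getD nm 0) →
      (∀ nm ∈ os, nm ∈ keys0) →
      gainD capd os d
        = (keys0.map (fun k => (bumpD capd os d).getD k 0)).sum
          - (keys0.map (fun k => d.getD k 0)).sum := by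
  intro os
  induction os with
  | nil =>
    intro d _ _
    simp [gainD, bumpD]
  | cons nm os ih =>
    intro d hle hmemk
    simp only [gainD, bumpD]
    by_cases hc : d.getD nm 0 < capd.getD nm 0
    · rw [if_pos hc, if_pos hc]
      have hle'' : ∀ x ∈ os, (d.modify nm 0 (· + 1)).getD x 0 ≤ capd.getD x 0 := by
        intro x hx
        rw [PySem.Dict.getD_modify]
        by_cases he : x = nm
        · subst he
          rw [if_pos rfl]
          show d.getD x 0 + 1 ≤ capd.getD x 0
          omega
        · rw [if_neg he]
          exact hle x (by simp [hx])
      have hS : (keys0.map (fun k => (d.modify nm 0 (· + 1)).getD k 0)).sum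
          = (keys0.map (fun k => d.getD k 0)).sum + 1 := by
        rw [sum_map_getD_modify keys0 hnd d nm (hmemk nm (by simp)) (· + 1)]
        ring
      rw [ih _ hle'' (fun x hx => hmemk x (by simp [hx])), hS]
      ring
    · rw [if_neg hc, if_neg hc]
      exact ih d (fun x hx => hle x (by simp [hx])) (fun x hx => hmemk x (by simp [hx]))

-- equal sums of pointwise-dominated maps are pointwise equal
lemma map_sum_eq_pointwise (f g : String → Int) :
    ∀ (l : List String), (∀ x ∈ l, f x ≤ g x) →
      (l.map f).sum = (l.map g).sum → ∀ x ∈ l, f x = g x := by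
  intro l
  induction l with
  | nil => intro _ _ x hx; simp at hx
  | cons y l ih =>
    intro hle hsum x hx
    simp only [List.map_cons, List.sum_cons] at hsum
    have h1 : (l.map f).sum ≤ (l.map g).sum :=
      List.sum_le_sum (fun z hz => hle z (by simp [hz]))
    have h2 : f y ≤ g y := hle y (by simp)
    rcases List.mem_cons.mp hx with rfl | hx'
    · omega
    · exact ih (fun z hz => hle z (by simp [hz])) (by omega) x hx'

lemma sum_map_min_le (l : List String) (f : String → Int) (B : Int) :
    (l.map (fun x => min (f x) B)).sum ≤ (l.length : Int) * B := by
  induction l with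
  | nil => simp
  | cons x l ih =>
    simp only [List.map_cons, List.sum_cons, List.length_cons]
    have : min (f x) B ≤ B := by omega
    push_cast
    nlinarith [ih]

lemma bFilledK_mono (capsd multd : PySem.Dict String Int) (keys : List String) (base : Int)
    (hm : ∀ k ∈ keys, 0 ≤ multd.getD k 0) {p q : Int} (hpq : p ≤ q) :
    bFilledK capsd multd keys base p ≤ bFilledK capsd multd keys base q := by
  induction keys with
  | nil => simp [bFilledK]
  | cons k ks ih =>
    simp only [bFilledK, List.map_cons, List.sum_cons] at ih ⊢
    have h1 : p * multd.getD k 0 ≤ q * multd.getD k 0 :=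
      mul_le_mul_of_nonneg_right hpq (hm k (by simp))
    have h2 := ih (fun x hx => hm x (by simp [hx]))
    omega

lemma bSearch_spec (total : Int) (capsd multd : PySem.Dict String Int) (keys : List String)
    (base : Int) (hm : ∀ k ∈ keys, 0 ≤ multd.getD k 0) :
    ∀ (lo hi : Int), bFilledK capsd multd keys base lo < total →
      total ≤ bFilledK capsd multd keys base hi → lo < hi →
      lo ≤ bSearch total capsd multd keys base lo hi - 1 ∧
      total ≤ bFilledK capsd multd keys base (bSearch total capsd multd keys base lo hi) ∧
      bFilledK capsd multd keys base (bSearch total capsd multd keys base lo hi - 1) < total := by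
  have key : ∀ (kk : Nat) (lo hi : Int), (hi - lo).toNat = kk →
      bFilledK capsd multd keys base lo < total →
      total ≤ bFilledK capsd multd keys base hi → lo < hi →
      lo ≤ bSearch total capsd multd keys base lo hi - 1 ∧
      total ≤ bFilledK capsd multd keys base (bSearch total capsd multd keys base lo hi) ∧
      bFilledK capsd multd keys base (bSearch total capsd multd keys base lo hi - 1) < total := by
    intro kk
    induction kk using Nat.strong_induction_on with
    | _ kk ih =>
      intro lo hi hk hlo hhi hlt
      by_cases h : lo + 1 < hi
      · obtain ⟨hm1, hm2⟩ := bMid lo hi h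
        rw [bSearch, dif_pos h]
        by_cases hmid : total ≤ bFilledK capsd multd keys base (PySem.Int.floordiv (lo + hi) 2)
        · rw [if_pos hmid]
          exact ih (PySem.Int.floordiv (lo + hi) 2 - lo).toNat (by omega) lo
            (PySem.Int.floordiv (lo + hi) 2) rfl hlo hmid (by omega)
        · rw [if_neg hmid]
          have hrec := ih (hi - PySem.Int.floordiv (lo + hi) 2).toNat (by omega)
            (PySem.Int.floordiv (lo + hi) 2) hi rfl (by omega) hhi (by omega)
          refine ⟨?_, hrec.2.1, hrec.2.2⟩
          have h1 := hrec.1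
          omega
      · rw [bSearch, dif_neg h]
        refine ⟨by omega, hhi, ?_⟩
        rw [show hi - 1 = lo from by omega]
        exact hlo
  exact fun lo hi h1 h2 h3 => key _ lo hi rfl h1 h2 h3

lemma foldl_max_sub_spec (base : Int) (l : List Int) :
    ∀ (b : Int), b ≤ l.foldl (fun h c => max h (c - base)) b ∧
      ∀ c ∈ l, c - base ≤ l.foldl (fun h c => max h (c - base)) b := by
  induction l with
  | nil => intro b; simp
  | cons c l ih =>
    intro b
    simp only [List.foldl_cons]
    obtain ⟨ih1, ih2⟩ := ih (max b (c - base))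
    refine ⟨le_trans (by omega) ih1, ?_⟩
    intro x hx
    rcases List.mem_cons.mp hx with h | h
    · subst h; exact le_trans (by omega) ih1
    · exact ih2 x h

-- the canonical state after j full rounds
def levelDict (capsd multd : PySem.Dict String Int) (keys0 : List String) (base j : Int) :
    PySem.Dict String Int :=
  PySem.Dict.mk (keys0.map (fun k => (k, min (capsd.getD k 0) (base + j * multd.getD k 0))))

lemma levelDict_keys (capsd multd : PySem.Dict String Int) (keys0 : List String) (base j : Int) :
    (levelDict capsd multd keys0 base j).keys = keys0 := by
  simp only [levelDict, PySem.Dict.keys, PySem.Dict.items, List.map_map]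
  have : ((fun (x : String × Int) => x.1) ∘
      fun k => ((k : String), min (capsd.getD k 0) (base + j * multd.getD k 0)))
      = fun k => k := by
    funext k
    rfl
  rw [this, List.map_id']

lemma levelDict_getD (capsd multd : PySem.Dict String Int) (keys0 : List String) (base j : Int)
    (hnd : keys0.Nodup) (k : String) (hk : k ∈ keys0) :
    (levelDict capsd multd keys0 base j).getD k 0
      = min (capsd.getD k 0) (base + j * multd.getD k 0) := by
  apply PySem.Dict.getD_of_mem_items
  · simp only [levelDict, PySem.Dict.items]
    exact List.mem_map.mpr ⟨k, hk, rfl⟩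
  · rw [levelDict_keys]
    exact hnd

-- one sweep from the canonical round-j state: its gain is the fill difference, it keeps the key
-- set, its unbroken result is the round-(j+1) state
lemma level_step (total : Int) (capd capsd multd : PySem.Dict String Int)
    (names keys0 : List String) (base : Int)
    (hnd0 : keys0.Nodup)
    (hmemk : ∀ nm ∈ names, nm ∈ keys0)
    (hcapeq : ∀ k ∈ keys0, capsd.getD k 0 = capd.getD k 0)
    (hmult : ∀ k ∈ keys0, multd.getD k 0 = (names.count k : Int))
    (j : Int) (hj : bFilledK capsd multd keys0 base j < total) :
    gainD capd names (levelDict capsd multd keys0 base j)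
        = bFilledK capsd multd keys0 base (j + 1) - bFilledK capsd multd keys0 base j ∧
    (bumpD capd names (levelDict capsd multd keys0 base j)).keys = keys0 ∧
    (∀ k ∈ keys0, (bumpD capd names (levelDict capsd multd keys0 base j)).getD k 0
        = min (capsd.getD k 0) (base + (j + 1) * multd.getD k 0)) ∧
    (bFilledK capsd multd keys0 base (j + 1) < total →
      bGo total capsd names (levelDict capsd multd keys0 base j)
          (bFilledK capsd multd keys0 base j)
        = levelDict capsd multd keys0 base (j + 1)) := by
  have hgd : ∀ k ∈ keys0, (levelDict capsd multd keys0 base j).getD k 0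
      = min (capsd.getD k 0) (base + j * multd.getD k 0) :=
    fun k hk => levelDict_getD capsd multd keys0 base j hnd0 k hk
  have hle_names : ∀ nm ∈ names,
      (levelDict capsd multd keys0 base j).getD nm 0 ≤ capd.getD nm 0 := by
    intro nm hnm
    have hk := hmemk nm hnm
    rw [hgd nm hk, ← hcapeq nm hk]
    omega
  have hS_level : (keys0.map (fun k => (levelDict capsd multd keys0 base j).getD k 0)).sum
      = bFilledK capsd multd keys0 base j := by
    unfold bFilledK
    exact congrArg List.sum (List.map_congr_left hgd)
  have hbump_getD : ∀ k ∈ keys0,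
      (bumpD capd names (levelDict capsd multd keys0 base j)).getD k 0
        = min (capsd.getD k 0) (base + (j + 1) * multd.getD k 0) := by
    intro k hk
    have hm0 : (0 : Int) ≤ multd.getD k 0 := by
      rw [hmult k hk]
      positivity
    rw [bump_getD capd names _ k hle_names (by rw [hgd k hk, ← hcapeq k hk]; omega),
      hgd k hk, ← hmult k hk, hcapeq k hk]
    have hd : (j + 1) * multd.getD k 0 = j * multd.getD k 0 + multd.getD k 0 := by ring
    rw [hd]
    omega
  have hS_bump : (keys0.map
        (fun k => (bumpD capd names (levelDict capsd multd keys0 base j)).getD k 0)).sum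
      = bFilledK capsd multd keys0 base (j + 1) := by
    unfold bFilledK
    exact congrArg List.sum (List.map_congr_left hbump_getD)
  have hgain : gainD capd names (levelDict capsd multd keys0 base j)
      = bFilledK capsd multd keys0 base (j + 1) - bFilledK capsd multd keys0 base j := by
    rw [gain_eq_sum capd keys0 hnd0 names _ hle_names hmemk, hS_bump, hS_level]
  have hkb : (bumpD capd names (levelDict capsd multd keys0 base j)).keys = keys0 := by
    rw [bump_keys capd names _ (fun nm hnm => by
      rw [PySem.Dict.contains_iff_mem_keys, levelDict_keys]
      exact hmemk nm hnm)]
    exact levelDict_keys capsd multd keys0 base j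
  refine ⟨hgain, hkb, hbump_getD, ?_⟩
  intro hnext
  rw [bGo_eq_bump total capd capsd names _ _ (by omega)
    (fun nm hnm => hcapeq nm (hmemk nm hnm))]
  apply PySem.Dict.ext
  rw [PySem.Dict.items_eq_map_keys _ (by rw [hkb]; exact hnd0) 0, hkb]
  exact List.map_congr_left (fun k hk => by rw [hbump_getD k hk])

-- ===== the master loop lemmas =====

lemma aWhile_exhaust (total : Int) (capd capsd multd : PySem.Dict String Int)
    (names keys0 : List String) (base : Int)
    (hnd0 : keys0.Nodup)
    (hmemk : ∀ nm ∈ names, nm ∈ keys0)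
    (hmemn : ∀ k ∈ keys0, k ∈ names)
    (hcapeq : ∀ k ∈ keys0, capsd.getD k 0 = capd.getD k 0)
    (hmult : ∀ k ∈ keys0, multd.getD k 0 = (names.count k : Int))
    (hkeysC : capsd.keys = keys0)
    (hsum : (keys0.map (fun k => capsd.getD k 0)).sum < total) :
    ∀ (kk : Nat) (j : Int), (total - bFilledK capsd multd keys0 base j).toNat = kk →
      bFilledK capsd multd keys0 base j < total →
      aWhile total capd names (levelDict capsd multd keys0 base j)
        (bFilledK capsd multd keys0 base j) = capsd := by
  intro kk
  induction kk using Nat.strong_induction_on with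
  | _ kk ih =>
    intro j hk hj
    obtain ⟨hgain, hkb, hbump, hnextdict⟩ := level_step total capd capsd multd names keys0 base
      hnd0 hmemk hcapeq hmult j hj
    have hfle : bFilledK capsd multd keys0 base (j + 1)
        ≤ (keys0.map (fun k => capsd.getD k 0)).sum := by
      unfold bFilledK
      exact List.sum_le_sum (fun k _ => by omega)
    rw [aWhile, dif_pos hj,
      aFor_eq total capd capsd names _ _ false hj (fun nm hnm => hcapeq nm (hmemk nm hnm))]
    simp only [Bool.false_or]
    by_cases hG : 0 < gainD capd names (levelDict capsd multd keys0 base j)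
    · rw [decide_eq_true hG, dif_pos rfl]
      have hmin : min total (bFilledK capsd multd keys0 base j
          + gainD capd names (levelDict capsd multd keys0 base j))
          = bFilledK capsd multd keys0 base (j + 1) := by omega
      rw [hmin, hnextdict (by omega)]
      exact ih (total - bFilledK capsd multd keys0 base (j + 1)).toNat (by omega) (j + 1) rfl
        (by omega)
    · have hG0 : gainD capd names (levelDict capsd multd keys0 base j) = 0 := by
        have := gainD_nonneg capd names (levelDict capsd multd keys0 base j)
        omega
      rw [hG0, decide_eq_false (by omega), dif_neg (by simp)]
      show bGo total capsd names (levelDict capsd multd keys0 base j)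
          (bFilledK capsd multd keys0 base j) = capsd
      rw [bGo_eq_bump total capd capsd names _ _ (by omega)
        (fun nm hnm => hcapeq nm (hmemk nm hnm))]
      -- the sweep gained nothing although capacity is short: every line is saturated
      have hpt := map_sum_eq_pointwise
        (fun k => min (capsd.getD k 0) (base + j * multd.getD k 0))
        (fun k => min (capsd.getD k 0) (base + (j + 1) * multd.getD k 0)) keys0
        (fun k hk => by
          show min (capsd.getD k 0) (base + j * multd.getD k 0)
              ≤ min (capsd.getD k 0) (base + (j + 1) * multd.getD k 0)
          have hm0 : (0 : Int) ≤ multd.getD k 0 := by rw [hmult k hk]; positivity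
          have hd : (j + 1) * multd.getD k 0 = j * multd.getD k 0 + multd.getD k 0 := by ring
          rw [hd]
          omega)
        (by
          show bFilledK capsd multd keys0 base j = bFilledK capsd multd keys0 base (j + 1)
          omega)
      apply PySem.Dict.ext
      rw [PySem.Dict.items_eq_map_keys _ (by rw [hkb]; exact hnd0) 0, hkb,
        PySem.Dict.items_eq_map_keys capsd (by rw [hkeysC]; exact hnd0) 0, hkeysC]
      refine List.map_congr_left (fun k hk => ?_)
      have hm1 : (1 : Int) ≤ multd.getD k 0 := by
        rw [hmult k hk]
        exact_mod_cast List.count_pos_iff.mpr (hmemn k hk)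
      have hstall : min (capsd.getD k 0) (base + j * multd.getD k 0)
          = min (capsd.getD k 0) (base + (j + 1) * multd.getD k 0) := hpt k hk
      have hd : (j + 1) * multd.getD k 0 = j * multd.getD k 0 + multd.getD k 0 := by ring
      rw [hd] at hstall
      rw [hbump k hk, hd]
      simp only [Prod.mk.injEq, true_and]
      omega

lemma aWhile_success (total : Int) (capd capsd multd : PySem.Dict String Int)
    (names keys0 : List String) (base : Int)
    (hnd0 : keys0.Nodup)
    (hmemk : ∀ nm ∈ names, nm ∈ keys0)
    (hmemn : ∀ k ∈ keys0, k ∈ names)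
    (hcapeq : ∀ k ∈ keys0, capsd.getD k 0 = capd.getD k 0)
    (hmult : ∀ k ∈ keys0, multd.getD k 0 = (names.count k : Int))
    (P : Int) (hP1 : total ≤ bFilledK capsd multd keys0 base P)
    (hP2 : bFilledK capsd multd keys0 base (P - 1) < total) :
    ∀ (kk : Nat) (j : Int), (total - bFilledK capsd multd keys0 base j).toNat = kk →
      bFilledK capsd multd keys0 base j < total → j ≤ P - 1 →
      aWhile total capd names (levelDict capsd multd keys0 base j)
        (bFilledK capsd multd keys0 base j)
        = bGo total capsd names (levelDict capsd multd keys0 base (P - 1))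
            (bFilledK capsd multd keys0 base (P - 1)) := by
  intro kk
  induction kk using Nat.strong_induction_on with
  | _ kk ih =>
    intro j hk hj hjP
    obtain ⟨hgain, hkb, hbump, hnextdict⟩ := level_step total capd capsd multd names keys0 base
      hnd0 hmemk hcapeq hmult j hj
    have hm0 : ∀ k ∈ keys0, (0 : Int) ≤ multd.getD k 0 := by
      intro k hk'
      rw [hmult k hk']
      positivity
    have hG : 0 < gainD capd names (levelDict capsd multd keys0 base j) := by
      by_contra hG0'
      have hG0 : gainD capd names (levelDict capsd multd keys0 base j) = 0 := by
        have := gainD_nonneg capd names (levelDict capsd multd keys0 base j)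
        omega
      -- a gainless sweep means saturation, contradicting that level P reaches total
      have hpt := map_sum_eq_pointwise
        (fun k => min (capsd.getD k 0) (base + j * multd.getD k 0))
        (fun k => min (capsd.getD k 0) (base + (j + 1) * multd.getD k 0)) keys0
        (fun k hk' => by
          show min (capsd.getD k 0) (base + j * multd.getD k 0)
              ≤ min (capsd.getD k 0) (base + (j + 1) * multd.getD k 0)
          have hd : (j + 1) * multd.getD k 0 = j * multd.getD k 0 + multd.getD k 0 := by ring
          rw [hd]
          have := hm0 k hk'
          omega)
        (by
          show bFilledK capsd multd keys0 base j = bFilledK capsd multd keys0 base (j + 1)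
          omega)
      have hsat : bFilledK capsd multd keys0 base P ≤ bFilledK capsd multd keys0 base j := by
        unfold bFilledK
        apply List.sum_le_sum
        intro k hk'
        have hm1 : (1 : Int) ≤ multd.getD k 0 := by
          rw [hmult k hk']
          exact_mod_cast List.count_pos_iff.mpr (hmemn k hk')
        have hstall : min (capsd.getD k 0) (base + j * multd.getD k 0)
            = min (capsd.getD k 0) (base + (j + 1) * multd.getD k 0) := hpt k hk'
        have hd : (j + 1) * multd.getD k 0 = j * multd.getD k 0 + multd.getD k 0 := by ring
        rw [hd] at hstall
        omega
      omega
    rw [aWhile, dif_pos hj,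
      aFor_eq total capd capsd names _ _ false hj (fun nm hnm => hcapeq nm (hmemk nm hnm))]
    simp only [Bool.false_or]
    rw [decide_eq_true hG, dif_pos rfl]
    by_cases hnext : bFilledK capsd multd keys0 base (j + 1) < total
    · have hmin : min total (bFilledK capsd multd keys0 base j
          + gainD capd names (levelDict capsd multd keys0 base j))
          = bFilledK capsd multd keys0 base (j + 1) := by omega
      have hjP' : j + 1 ≤ P - 1 := by
        by_contra hcon
        have hPj : P = j + 1 := by omega
        rw [hPj] at hP1
        omega
      rw [hmin, hnextdict hnext]
      exact ih (total - bFilledK capsd multd keys0 base (j + 1)).toNat (by omega) (j + 1) rfl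
        (by omega) hjP'
    · -- this sweep reaches total: it is the final hand-out pass, and j = P - 1
      have hPj : P - 1 = j := by
        by_contra hcon
        have h1 : j + 1 ≤ P - 1 := by omega
        have := bFilledK_mono capsd multd keys0 base hm0 h1
        omega
      have hmin : min total (bFilledK capsd multd keys0 base j
          + gainD capd names (levelDict capsd multd keys0 base j)) = total := by omega
      rw [hmin, aWhile, dif_neg (by omega), hPj]

lemma map_fst_pairs (l : List String) (f : String → Int) :
    (l.map (fun k => (k, f k))).map (fun x => x.1) = l := by
  rw [List.map_map]
  have : ((fun (x : String × Int) => x.1) ∘ fun k => ((k : String), f k)) = fun k => k :=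
    funext (fun k => rfl)
  rw [this, List.map_id']

-- ===== VERDICT (by name: the statement is the Claim_ definition above) =====
theorem allocate_line_targets_py_spec : Claim_equal_allocate_line_targets_py := by
  unfold Claim_equal_allocate_line_targets_py
  intro total names capacities _ hpre
  unfold Spec_allocate_line_targets_py
  by_cases ht : total ≤ 0
  · simp only [allocate_line_targets_py, allocate_line_targets_py_alt, if_pos ht]
  · have hne : names ≠ [] := hpre (by omega)
    simp only [allocate_line_targets_py, allocate_line_targets_py_alt, if_neg ht]
    set capd := PySem.Dict.mk capacities with hcapd
    set base := PySem.Int.floordiv total (PySem.List.len names) with hbase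
    set multd := names.foldl (fun d nm => d.insert nm (d.getD nm 0 + 1))
      (PySem.Dict.empty : PySem.Dict String Int) with hmultd
    set keys0 := multd.keys with hkeys0
    set capsd := keys0.foldl (fun d nm => d.insert nm (capd.getD nm 0)) PySem.Dict.empty
      with hcapsd
    -- key-set facts
    have hnd0 : keys0.Nodup := by
      rw [hkeys0, hmultd]
      exact PySem.Dict.nodup_keys_foldl_insert names _ _ PySem.Dict.nodup_keys_empty
    have hmem : ∀ x, x ∈ keys0 ↔ x ∈ names := by
      intro x
      rw [hkeys0, hmultd, PySem.Dict.keys_foldl_insert, PySem.Set.mem_update]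
      simp [PySem.Dict.keys_empty]
    have hmultAll : ∀ k, multd.getD k 0 = (names.count k : Int) := by
      intro k
      rw [hmultd]
      have h := PySem.Dict.getD_foldl_insert_add_one names PySem.Dict.empty k
      rw [h, PySem.Dict.getD_empty]
      omega
    have hm0 : ∀ k ∈ keys0, (0 : Int) ≤ multd.getD k 0 := by
      intro k _
      rw [hmultAll k]
      positivity
    -- capsd facts
    have hcaps_items : capsd.items = keys0.map (fun k => (k, capd.getD k 0)) := by
      rw [hcapsd]
      have h := PySem.Dict.items_foldl_insert_fresh keys0 (fun nm => nm)
        (fun nm => capd.getD nm 0) PySem.Dict.empty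
        (fun a _ => PySem.Dict.contains_empty a) (by simpa using hnd0)
      simpa [PySem.Dict.empty] using h
    have hkeysC : capsd.keys = keys0 := by
      show capsd.items.map (fun x => x.1) = keys0
      rw [hcaps_items, map_fst_pairs]
    have hcapeq : ∀ k ∈ keys0, capsd.getD k 0 = capd.getD k 0 := by
      intro k hk
      rw [hcapsd, getD_foldl_insert_keyfn _ keys0 _ k, if_pos hk]
    have hcaps_vals : capsd.values = keys0.map (fun k => capsd.getD k 0) := by
      rw [PySem.Dict.values_eq_map_keys capsd (by rw [hkeysC]; exact hnd0) 0, hkeysC]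
    -- A's initial dict is the round-0 state
    set dInit := names.foldl (fun d nm => d.insert nm (min base (capd.getD nm 0)))
      PySem.Dict.empty with hdInit
    have hkeysI : dInit.keys = keys0 := by
      rw [hdInit, hkeys0, hmultd, PySem.Dict.keys_foldl_insert, PySem.Dict.keys_foldl_insert]
    have hndI : dInit.keys.Nodup := by rw [hkeysI]; exact hnd0
    have hgetI : ∀ k, dInit.getD k 0 = if k ∈ names then min base (capd.getD k 0) else 0 := by
      intro k
      rw [hdInit, getD_foldl_insert_keyfn _ names _ k, PySem.Dict.getD_empty]
    have hInit_eq : dInit = levelDict capsd multd keys0 base 0 := by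
      apply PySem.Dict.ext
      rw [PySem.Dict.items_eq_map_keys dInit hndI 0, hkeysI]
      refine List.map_congr_left (fun k hk => ?_)
      rw [hgetI k, if_pos ((hmem k).mp hk), hcapeq k hk]
      simp only [Prod.mk.injEq, true_and]
      omega
    have hassigned : dInit.values.sum = bFilledK capsd multd keys0 base 0 := by
      rw [PySem.Dict.values_eq_map_keys dInit hndI 0, hkeysI]
      unfold bFilledK
      refine congrArg List.sum (List.map_congr_left (fun k hk => ?_))
      rw [hgetI k, if_pos ((hmem k).mp hk), hcapeq k hk]
      omega
    -- B's initial targets dict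
    have ht0_items : (keys0.foldl (fun d nm => d.insert nm (min base (capsd.getD nm 0)))
        PySem.Dict.empty).items = keys0.map (fun k => (k, min base (capsd.getD k 0))) := by
      have h := PySem.Dict.items_foldl_insert_fresh keys0 (fun nm => nm)
        (fun nm => min base (capsd.getD nm 0)) PySem.Dict.empty
        (fun a _ => PySem.Dict.contains_empty a) (by simpa using hnd0)
      simpa [PySem.Dict.empty] using h
    have ht0_vals : (keys0.foldl (fun d nm => d.insert nm (min base (capsd.getD nm 0)))
        PySem.Dict.empty).values.sum = bFilledK capsd multd keys0 base 0 := by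
      show ((keys0.foldl (fun d nm => d.insert nm (min base (capsd.getD nm 0)))
        PySem.Dict.empty).items.map (fun x => x.2)).sum = _
      rw [ht0_items, List.map_map]
      unfold bFilledK
      refine congrArg List.sum (List.map_congr_left (fun k hk => ?_))
      show min base (capsd.getD k 0) = min (capsd.getD k 0) (base + 0 * multd.getD k 0)
      omega
    -- size bound: the round-0 fill never exceeds total
    have hlen_pos : 0 < names.length := List.length_pos_of_ne_nil hne
    have hbase0 : 0 ≤ base := by
      rw [hbase, PySem.Int.floordiv_eq_ediv_of_pos
        (by rw [PySem.List.len_eq]; exact_mod_cast hlen_pos)]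
      exact Int.ediv_nonneg (by omega) (by rw [PySem.List.len_eq]; positivity)
    have hklen : keys0.length ≤ names.length := by
      calc keys0.length = keys0.toFinset.card := (List.toFinset_card_of_nodup hnd0).symm
        _ ≤ names.toFinset.card := Finset.card_le_card (fun x hx => by
            simp only [List.mem_toFinset] at hx ⊢
            exact (hmem x).mp hx)
        _ ≤ names.length := names.toFinset_card_le
    have hf0_le : bFilledK capsd multd keys0 base 0 ≤ total := by
      have h1 : bFilledK capsd multd keys0 base 0
          = (keys0.map (fun x => min (capsd.getD x 0) base)).sum := by
        unfold bFilledK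
        refine congrArg List.sum (List.map_congr_left (fun k hk => ?_))
        omega
      have h2 := sum_map_min_le keys0 (fun x => capsd.getD x 0) base
      have h3 : (keys0.length : Int) * base ≤ (names.length : Int) * base :=
        mul_le_mul_of_nonneg_right (by exact_mod_cast hklen) hbase0
      have h4 : (names.length : Int) * base ≤ total := by
        rw [hbase, PySem.Int.floordiv_eq_ediv_of_pos
          (by rw [PySem.List.len_eq]; exact_mod_cast hlen_pos), PySem.List.len_eq, mul_comm]
        exact Int.ediv_mul_le total (Int.natCast_ne_zero.mpr hlen_pos.ne')
      omega
    -- rewrite A's side into the canonical round-0 form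
    rw [hassigned, hInit_eq]
    by_cases hfb : total ≤ bFilledK capsd multd keys0 base 0
    · -- round 0 already meets total: A's loop never runs, B returns its initial targets
      rw [if_pos (by rw [ht0_vals]; exact hfb)]
      rw [aWhile, dif_neg (by omega)]
      rw [ht0_items]
      show (levelDict capsd multd keys0 base 0).items = _
      refine List.map_congr_left (fun k hk => ?_)
      simp only [Prod.mk.injEq, true_and]
      omega
    · rw [if_neg (by rw [ht0_vals]; exact hfb)]
      have hf0lt : bFilledK capsd multd keys0 base 0 < total := by omega
      by_cases hsum : capsd.values.sum < total
      · -- not enough capacity anywhere: A saturates every line, B returns the caps dict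
        rw [if_pos hsum]
        rw [aWhile_exhaust total capd capsd multd names keys0 base hnd0
          (fun nm hnm => (hmem nm).mpr hnm) (fun k hk => (hmem k).mp hk) hcapeq
          (fun k _ => hmultAll k) hkeysC
          (by rw [← hcaps_vals]; exact hsum)
          (total - bFilledK capsd multd keys0 base 0).toNat 0 rfl hf0lt]
      · rw [if_neg hsum]
        -- binary search the first round P that reaches total
        have hhi := foldl_max_sub_spec base capsd.values 1
        have h1hi : (1 : Int) ≤ capsd.values.foldl (fun h c => max h (c - base)) 1 := hhi.1
        have hfhi : total ≤ bFilledK capsd multd keys0 base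
            (capsd.values.foldl (fun h c => max h (c - base)) 1) := by
          have heq : bFilledK capsd multd keys0 base
              (capsd.values.foldl (fun h c => max h (c - base)) 1)
              = (keys0.map (fun k => capsd.getD k 0)).sum := by
            unfold bFilledK
            refine congrArg List.sum (List.map_congr_left (fun k hk => ?_))
            have hcv : capsd.getD k 0 ∈ capsd.values := by
              rw [hcaps_vals]
              exact List.mem_map.mpr ⟨k, hk, rfl⟩
            have hub := hhi.2 (capsd.getD k 0) hcv
            have hm1 : (1 : Int) ≤ multd.getD k 0 := by
              rw [hmultAll k]
              exact_mod_cast List.count_pos_iff.mpr ((hmem k).mp hk)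
            have hmul : capsd.values.foldl (fun h c => max h (c - base)) 1 * 1
                ≤ capsd.values.foldl (fun h c => max h (c - base)) 1 * multd.getD k 0 :=
              mul_le_mul_of_nonneg_left hm1 (by omega)
            omega
          rw [heq, ← hcaps_vals]
          omega
        obtain ⟨hP0, hP1, hP2⟩ := bSearch_spec total capsd multd keys0 base hm0 0
          (capsd.values.foldl (fun h c => max h (c - base)) 1) hf0lt hfhi (by omega)
        rw [aWhile_success total capd capsd multd names keys0 base hnd0
          (fun nm hnm => (hmem nm).mpr hnm) (fun k hk => (hmem k).mp hk) hcapeq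
          (fun k _ => hmultAll k)
          (bSearch total capsd multd keys0 base 0
            (capsd.values.foldl (fun h c => max h (c - base)) 1)) hP1 hP2
          (total - bFilledK capsd multd keys0 base 0).toNat 0 rfl hf0lt (by omega)]
        -- B's rebuilt state is exactly the round-(P-1) state
        have hst : keys0.foldl (fun d nm => d.insert nm (min (capsd.getD nm 0)
            (base + (bSearch total capsd multd keys0 base 0
              (capsd.values.foldl (fun h c => max h (c - base)) 1) - 1) * multd.getD nm 0)))
            PySem.Dict.empty
            = levelDict capsd multd keys0 base
              (bSearch total capsd multd keys0 base 0
                (capsd.values.foldl (fun h c => max h (c - base)) 1) - 1) := by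
          apply PySem.Dict.ext
          have h := PySem.Dict.items_foldl_insert_fresh keys0 (fun nm => nm)
            (fun nm => min (capsd.getD nm 0)
              (base + (bSearch total capsd multd keys0 base 0
                (capsd.values.foldl (fun h c => max h (c - base)) 1) - 1) * multd.getD nm 0))
            PySem.Dict.empty (fun a _ => PySem.Dict.contains_empty a) (by simpa using hnd0)
          simpa [PySem.Dict.empty, levelDict] using h
        rw [hst]
        have ha0 : (levelDict capsd multd keys0 base
            (bSearch total capsd multd keys0 base 0
              (capsd.values.foldl (fun h c => max h (c - base)) 1) - 1)).values.sum
            = bFilledK capsd multd keys0 base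
              (bSearch total capsd multd keys0 base 0
                (capsd.values.foldl (fun h c => max h (c - base)) 1) - 1) := by
          rw [PySem.Dict.values_eq_map_keys _ (by rw [levelDict_keys]; exact hnd0) 0,
            levelDict_keys]
          unfold bFilledK
          exact congrArg List.sum (List.map_congr_left (fun k hk =>
            levelDict_getD capsd multd keys0 base _ hnd0 k hk))
        rw [ha0]
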